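-- pv_equiv track=rewrite | github.com/c0c3t0/CodeChef-Solutions | Strings/Easy Pronunciation/easy_pronunciation.py | solve
-- ===== SOURCE A (Python) =====
-- def solve(lenght, text):
--     if lenght <= 3:
--         return "YES"
--
--     vowels = 'aeiou'
--     consonants = 0
--
--     for char in text:
--         if char not in vowels:
--             consonants += 1
--             if consonants == 4:
--                 break
--         else:
--             consonants = 0
--
--     if consonants == 4:
--         return "NO"
--     else:
--         return "YES"
-- ===== SOURCE B (Python) =====
-- def solve(lenght, text):
--     if lenght <= 3:
--         return "YES"
--     vowels = 'aeiou'
--     s = text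
--     while len(s) >= 4:
--         if all(ch not in vowels for ch in s[:4]):
--             return "NO"
--         s = s[1:]
--     return "YES"
-- ===== Notes on version B (the rewrite author's own statement) =====
-- stated objective: alternative
-- what changed: Replaces the run-length counter with reset-on-vowel by a sliding-window scan that tests each 4-character window for being all consonants.
import Mathlib
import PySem

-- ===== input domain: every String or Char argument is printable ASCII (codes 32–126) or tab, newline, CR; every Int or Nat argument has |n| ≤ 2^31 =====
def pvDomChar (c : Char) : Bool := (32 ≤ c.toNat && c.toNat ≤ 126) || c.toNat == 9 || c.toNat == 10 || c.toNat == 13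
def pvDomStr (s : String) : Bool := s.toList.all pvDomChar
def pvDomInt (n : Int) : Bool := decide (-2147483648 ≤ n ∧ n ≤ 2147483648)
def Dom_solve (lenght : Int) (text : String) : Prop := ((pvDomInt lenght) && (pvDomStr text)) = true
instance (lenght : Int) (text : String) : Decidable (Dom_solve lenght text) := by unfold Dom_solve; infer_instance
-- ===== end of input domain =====

-- B replaces A's run-length counter (reset on vowel, break at 4) by a sliding-window
-- scan testing each 4-character window; same O(n) cost (objective: alternative).

-- ===== PORT A =====
def pvVowels : List Char := ['a', 'e', 'i', 'o', 'u']

-- the for-loop over text with the counter; 'break' returns the counter (= 4) at once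
def solveLoop : List Char → Int → Int
  | [], consonants => consonants
  | ch :: rest, consonants =>
    if ch ∉ pvVowels then
      if consonants + 1 = 4 then consonants + 1 else solveLoop rest (consonants + 1)
    else solveLoop rest 0

def solve (lenght : Int) (text : String) : String :=
  if lenght ≤ 3 then "YES"
  else if solveLoop text.toList 0 = 4 then "NO" else "YES"

-- ===== PORT B =====
-- the while-loop: test the window s[:4], then slide with s = s[1:]
def altLoop (s : List Char) : Option String :=
  if _h : 4 ≤ s.length then
    if (PySem.List.slice s none (some 4)).all (fun ch => decide (ch ∉ pvVowels)) then
      some "NO"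
    else altLoop (PySem.List.slice s (some 1) none)
  else none
termination_by s.length
decreasing_by simp [PySem.List.slice_from_one]; omega

def solve_alt (lenght : Int) (text : String) : String :=
  if lenght ≤ 3 then "YES"
  else match altLoop text.toList with
    | some r => r
    | none => "YES"

-- ===== PRECONDITION & SPEC =====
def Spec_solve (lenght : Int) (text : String) (out : String) : Prop := out = solve_alt lenght text
instance (lenght : Int) (text : String) (out : String) : Decidable (Spec_solve lenght text out) := by unfold Spec_solve; infer_instance

-- ===== CLAIM (what is proved, stated in full; the proofs are below) =====
def Claim_equal_solve : Prop := ∀ (lenght : Int) (text : String), Dom_solve lenght text → Spec_solve lenght text (solve lenght text)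

-- ===== LEMMAS AND PROOFS =====

-- number of leading consonants
def leadCons : List Char → Nat
  | [] => 0
  | c :: rest => if c ∉ pvVowels then leadCons rest + 1 else 0

theorem leadCons_le (l : List Char) : leadCons l ≤ l.length := by
  induction l with
  | nil => simp [leadCons]
  | cons c t ih => simp only [leadCons, List.length_cons]; split_ifs <;> omega

theorem altLoop_nil : altLoop [] = none := by
  rw [altLoop]; simp

theorem altLoop_cons (c : Char) (rest : List Char) :
    altLoop (c :: rest) = if 4 ≤ leadCons (c :: rest) then some "NO" else altLoop rest := by
  by_cases h : 4 ≤ (c :: rest).length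
  · obtain ⟨b, d, e, t, rfl⟩ : ∃ b d e t, rest = b :: d :: e :: t := by
      match rest, h with | b :: d :: e :: t, _ => exact ⟨b, d, e, t, rfl⟩
    rw [altLoop, dif_pos h, PySem.List.slice_from_one]
    have hto := PySem.List.slice_to (b := (4 : Int)) (c :: b :: d :: e :: t) (by norm_num)
    norm_num at hto
    rw [hto]
    by_cases hc : c ∈ pvVowels <;> by_cases hb : b ∈ pvVowels <;>
      by_cases hd : d ∈ pvVowels <;> by_cases he : e ∈ pvVowels <;>
      simp [leadCons, hc, hb, hd, he]
  · rw [altLoop, dif_neg h]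
    have h1 : leadCons (c :: rest) ≤ (c :: rest).length := leadCons_le _
    rw [if_neg (by omega)]
    cases rest with
    | nil => exact altLoop_nil.symm
    | cons d t =>
      rw [altLoop, dif_neg (by simp_all [List.length]; omega)]

theorem altLoop_of_lead (s : List Char) (h : 4 ≤ leadCons s) : altLoop s = some "NO" := by
  cases s with
  | nil => simp [leadCons] at h
  | cons c rest => rw [altLoop_cons, if_pos h]

theorem altLoop_result (s : List Char) (r : String) (h : altLoop s = some r) : r = "NO" := by
  induction s with
  | nil => rw [altLoop_nil] at h; cases h
  | cons c t ih =>
    rw [altLoop_cons] at h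
    split_ifs at h with hh
    · exact (Option.some.inj h).symm
    · exact ih h

-- the main invariant: the counter loop hits 4 iff, together with k pending consonants,
-- a 4-consonant window exists
theorem loop_iff (s : List Char) : ∀ k : Int, 0 ≤ k → k ≤ 3 →
    (solveLoop s k = 4 ↔ (4 ≤ k + (leadCons s : Int) ∨ altLoop s = some "NO")) := by
  induction s with
  | nil =>
    intro k h0 h3
    simp [solveLoop, leadCons, altLoop_nil]
    omega
  | cons c rest ih =>
    intro k h0 h3
    by_cases hc : c ∉ pvVowels
    · have hlc : leadCons (c :: rest) = leadCons rest + 1 := by simp [leadCons, hc]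
      rw [altLoop_cons, hlc]
      simp only [solveLoop, if_pos hc]
      by_cases hk : k + 1 = 4
      · rw [if_pos hk]
        constructor
        · intro _; left; push_cast; omega
        · intro _; exact hk
      · rw [if_neg hk, ih (k + 1) (by omega) (by omega)]
        by_cases hlead : 4 ≤ leadCons rest + 1
        · rw [if_pos hlead]
          constructor
          · intro _; right; rfl
          · intro _; left; omega
        · rw [if_neg hlead]
          constructor <;> rintro (h | h)
          · left; push_cast at h ⊢; omega
          · right; exact h
          · left; push_cast at h ⊢; omega
          · right; exact h
    · have hlc : leadCons (c :: rest) = 0 := by simp [leadCons, hc]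
      rw [altLoop_cons, hlc, if_neg (by omega)]
      simp only [solveLoop, if_neg hc]
      rw [ih 0 le_rfl (by norm_num)]
      constructor <;> rintro (h | h)
      · right; exact altLoop_of_lead rest (by omega)
      · right; exact h
      · exfalso; omega
      · right; exact h

theorem solve_eq_alt (lenght : Int) (text : String) : solve lenght text = solve_alt lenght text := by
  unfold solve solve_alt
  by_cases hl : lenght ≤ 3
  · simp [hl]
  · simp only [if_neg hl]
    have hiff := loop_iff text.toList 0 le_rfl (by norm_num)
    rcases hA : altLoop text.toList with _ | r
    · have h4 : solveLoop text.toList 0 ≠ 4 := by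
        intro hEq
        rcases hiff.mp hEq with h | h
        · have hle : 4 ≤ leadCons text.toList := by omega
          rw [altLoop_of_lead _ hle] at hA; cases hA
        · rw [hA] at h; cases h
      rw [if_neg h4]
    · obtain rfl := altLoop_result _ _ hA
      rw [if_pos (hiff.mpr (Or.inr hA))]

-- ===== VERDICT (by name: the statement is the Claim_ definition above) =====
theorem solve_spec : Claim_equal_solve := by
  intro lenght text _
  unfold Spec_solve
  exact solve_eq_alt lenght text
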